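-- pv_equiv track=rewrite | github.com/suleyma40/123tutela | backend/app_v2.py | _payment_entitlements_from_orders
-- ===== SOURCE A (Python) =====
-- from typing import Any
--
-- def _lower(value: Any) -> str:
--     return str(value or "").strip().lower()
--
-- def _payment_entitlements_from_orders(orders: list[dict[str, Any]]) -> dict[str, Any]:
--     approved = [item for item in orders if _lower(item.get("status")) == "approved"]
--     approved_codes = {_lower(item.get("product_code")) for item in approved}
--     document_paid = bool(approved)
--     filing_bundle_paid = "addon_filing_bundle" in approved_codes
--     filing_paid = any(
--         bool(item.get("include_filing"))
--         or _lower(item.get("product_code")) == "addon_filing_auto"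
--         or filing_bundle_paid
--         for item in approved
--     )
--     guide_paid = filing_paid or "addon_filing_guide" in approved_codes
--     follow_up_paid = filing_bundle_paid or "addon_follow_up" in approved_codes
--     return {
--         "document_paid": document_paid,
--         "filing_bundle_paid": filing_bundle_paid,
--         "filing_auto_paid": filing_paid,
--         "filing_guide_paid": guide_paid,
--         "follow_up_paid": follow_up_paid,
--     }
-- ===== SOURCE B (Python) =====
-- from typing import Any
--
-- def _lower(value: Any) -> str:
--     return str(value or "").strip().lower()
--
-- def _payment_entitlements_from_orders(orders: list[dict[str, Any]]) -> dict[str, Any]: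
--     any_approved = has_bundle = has_guide = has_follow = has_trigger = False
--     for item in orders:
--         if _lower(item.get("status")) != "approved":
--             continue
--         any_approved = True
--         code = _lower(item.get("product_code"))
--         if code == "addon_filing_bundle":
--             has_bundle = True
--         if code == "addon_filing_guide":
--             has_guide = True
--         if code == "addon_follow_up":
--             has_follow = True
--         if item.get("include_filing") or code == "addon_filing_auto":
--             has_trigger = True
--     filing_paid = has_trigger or has_bundle
--     return {
--         "document_paid": any_approved,
--         "filing_bundle_paid": has_bundle,
--         "filing_auto_paid": filing_paid,
--         "filing_guide_paid": filing_paid or has_guide,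
--         "follow_up_paid": has_bundle or has_follow,
--     }
-- ===== Notes on version B (the rewrite author's own statement) =====
-- stated objective: alternative
-- what changed: Replaces A's approved-list comprehension + codes-set + any() rescan (four passes over the approved items) by a single fold over orders maintaining five boolean accumulators, deriving the paid flags after the loop.
import Mathlib
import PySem

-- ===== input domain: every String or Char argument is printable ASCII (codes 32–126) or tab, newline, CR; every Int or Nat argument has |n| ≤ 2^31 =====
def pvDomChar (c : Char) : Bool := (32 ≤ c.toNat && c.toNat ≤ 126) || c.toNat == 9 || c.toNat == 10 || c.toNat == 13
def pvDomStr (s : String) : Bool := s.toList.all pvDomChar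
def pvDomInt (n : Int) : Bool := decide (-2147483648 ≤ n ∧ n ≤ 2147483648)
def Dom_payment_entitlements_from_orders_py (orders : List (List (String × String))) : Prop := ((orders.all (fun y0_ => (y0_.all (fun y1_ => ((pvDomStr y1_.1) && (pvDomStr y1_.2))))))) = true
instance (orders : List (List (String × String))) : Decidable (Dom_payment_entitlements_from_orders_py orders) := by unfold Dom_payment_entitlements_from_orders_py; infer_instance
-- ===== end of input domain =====

-- B replaces A's approved-list comprehension + codes-set + any() rescan by one accumulating pass; return values proved equal.

-- ===== PORT A =====
-- _lower(value) = str(value or "").strip().lower(), applied to an Optional[str] (None for a missing key)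
def pvLower (v : Option String) : String := PySem.Str.lower (PySem.Str.strip (v.getD ""))
-- item.get(k) on the dict (association list, first match)
def pvGet (item : List (String × String)) (k : String) : Option String := (PySem.Dict.mk item).get? k
-- bool(item.get("include_filing")): None and "" are falsy, any other string truthy
def pvTruthy (v : Option String) : Bool := match v with | none => false | some s => !(s == "")

def payment_entitlements_from_orders_py (orders : List (List (String × String))) : List (String × Bool) :=
  let approved := orders.filter (fun item => pvLower (pvGet item "status") == "approved")
  let approved_codes : PySem.Set String :=
    PySem.Set.ofList (approved.map (fun item => pvLower (pvGet item "product_code")))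
  let document_paid := !approved.isEmpty
  let filing_bundle_paid := PySem.Set.contains approved_codes "addon_filing_bundle"
  let filing_paid := approved.any (fun item =>
    pvTruthy (pvGet item "include_filing")
    || (pvLower (pvGet item "product_code") == "addon_filing_auto")
    || filing_bundle_paid)
  let guide_paid := filing_paid || PySem.Set.contains approved_codes "addon_filing_guide"
  let follow_up_paid := filing_bundle_paid || PySem.Set.contains approved_codes "addon_follow_up"
  [("document_paid", document_paid),
   ("filing_bundle_paid", filing_bundle_paid),
   ("filing_auto_paid", filing_paid),
   ("filing_guide_paid", guide_paid),
   ("follow_up_paid", follow_up_paid)]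

-- ===== PORT B =====
-- single pass; state = (any_approved, has_bundle, has_guide, has_follow, has_trigger)
def pvStep (st : Bool × Bool × Bool × Bool × Bool) (item : List (String × String)) :
    Bool × Bool × Bool × Bool × Bool :=
  if pvLower (pvGet item "status") == "approved" then
    let code := pvLower (pvGet item "product_code")
    (true,
     st.2.1 || (code == "addon_filing_bundle"),
     st.2.2.1 || (code == "addon_filing_guide"),
     st.2.2.2.1 || (code == "addon_follow_up"),
     st.2.2.2.2 || (pvTruthy (pvGet item "include_filing") || (code == "addon_filing_auto")))
  else st

def payment_entitlements_from_orders_py_alt (orders : List (List (String × String))) : List (String × Bool) :=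
  let st := orders.foldl pvStep (false, false, false, false, false)
  let filing_paid := st.2.2.2.2 || st.2.1
  [("document_paid", st.1),
   ("filing_bundle_paid", st.2.1),
   ("filing_auto_paid", filing_paid),
   ("filing_guide_paid", filing_paid || st.2.2.1),
   ("follow_up_paid", st.2.1 || st.2.2.2.1)]

-- ===== PRECONDITION & SPEC =====
def Spec_payment_entitlements_from_orders_py (orders : List (List (String × String))) (out : List (String × Bool)) : Prop := out = payment_entitlements_from_orders_py_alt orders
instance (orders : List (List (String × String))) (out : List (String × Bool)) : Decidable (Spec_payment_entitlements_from_orders_py orders out) := by unfold Spec_payment_entitlements_from_orders_py; infer_instance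

-- ===== CLAIM (what is proved, stated in full; the proofs are below) =====
def Claim_equal_payment_entitlements_from_orders_py : Prop := ∀ (orders : List (List (String × String))), Dom_payment_entitlements_from_orders_py orders → Spec_payment_entitlements_from_orders_py orders (payment_entitlements_from_orders_py orders)

-- ===== LEMMAS AND PROOFS =====

-- shorthands for the three per-item tests both programs perform
def pvIsApp (item : List (String × String)) : Bool := pvLower (pvGet item "status") == "approved"
def pvCodeIs (c : String) (item : List (String × String)) : Bool := pvLower (pvGet item "product_code") == c
def pvTrig (item : List (String × String)) : Bool :=
  pvTruthy (pvGet item "include_filing") || pvCodeIs "addon_filing_auto" item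

-- characterisation of B's fold as five List.any facts
theorem pvStep_foldl (l : List (List (String × String))) (a b g f t : Bool) :
    l.foldl pvStep (a, b, g, f, t) =
      (a || l.any pvIsApp,
       b || l.any (fun x => pvIsApp x && pvCodeIs "addon_filing_bundle" x),
       g || l.any (fun x => pvIsApp x && pvCodeIs "addon_filing_guide" x),
       f || l.any (fun x => pvIsApp x && pvCodeIs "addon_follow_up" x),
       t || l.any (fun x => pvIsApp x && pvTrig x)) := by
  induction l generalizing a b g f t with
  | nil => simp
  | cons x xs ih =>
    rw [List.foldl_cons, pvStep]
    rcases hp : pvIsApp x with _ | _ <;>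
      simp only [pvIsApp] at hp <;>
      simp [List.any_cons, pvIsApp, pvTrig, pvCodeIs, hp, ih, Bool.or_assoc]

-- membership of a mapped filtered list in the set of codes, as a single any over l
theorem pv_contains_filter_map (l : List (List (String × String))) (p : List (String × String) → Bool)
    (f : List (String × String) → String) (c : String) :
    PySem.Set.contains (PySem.Set.ofList ((l.filter p).map f)) c
      = l.any (fun x => p x && (f x == c)) := by
  rw [Bool.eq_iff_iff, PySem.Set.contains_iff, PySem.Set.mem_ofList, List.mem_map,
    List.any_eq_true]
  constructor
  · rintro ⟨x, hx, rfl⟩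
    exact ⟨x, List.mem_of_mem_filter hx, by simp [List.of_mem_filter hx]⟩
  · rintro ⟨x, hx, h⟩
    rw [Bool.and_eq_true, beq_iff_eq] at h
    exact ⟨x, List.mem_filter_of_mem hx h.1, h.2⟩

theorem pv_isEmpty_filter (l : List (List (String × String))) (p : List (String × String) → Bool) :
    (!(l.filter p).isEmpty) = l.any p := by
  induction l with
  | nil => rfl
  | cons x xs ih =>
    rcases h : p x with _ | _ <;> simp [h, ih]

theorem pv_any_filter (l : List (List (String × String))) (p q : List (String × String) → Bool) :
    (l.filter p).any q = l.any (fun x => p x && q x) := by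
  induction l with
  | nil => rfl
  | cons x xs ih =>
    rcases h : p x with _ | _ <;> simp [h, ih]

-- the any() rescan of A, folded into trigger-or-bundle
theorem pv_filing_eq (l : List (List (String × String))) :
    l.any (fun x => pvIsApp x &&
        (pvTruthy (pvGet x "include_filing") || pvCodeIs "addon_filing_auto" x
          || l.any (fun y => pvIsApp y && pvCodeIs "addon_filing_bundle" y)))
      = (l.any (fun x => pvIsApp x && pvTrig x)
          || l.any (fun y => pvIsApp y && pvCodeIs "addon_filing_bundle" y)) := by
  rcases hb : l.any (fun y => pvIsApp y && pvCodeIs "addon_filing_bundle" y) with _ | _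
  · rw [Bool.or_false]
    have hpq : (fun x => pvIsApp x &&
        (pvTruthy (pvGet x "include_filing") || pvCodeIs "addon_filing_auto" x || false))
        = (fun x => pvIsApp x && pvTrig x) := by
      funext x; simp [pvTrig]
    rw [hpq]
  · rw [Bool.or_true]
    have hpq : (fun x => pvIsApp x &&
        (pvTruthy (pvGet x "include_filing") || pvCodeIs "addon_filing_auto" x || true))
        = pvIsApp := by
      funext x; simp
    rw [hpq]
    rw [List.any_eq_true] at hb ⊢
    obtain ⟨y, hy, hb⟩ := hb
    rw [Bool.and_eq_true] at hb
    exact ⟨y, hy, hb.1⟩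

-- ===== VERDICT (by name: the statement is the Claim_ definition above) =====
theorem payment_entitlements_from_orders_py_spec : Claim_equal_payment_entitlements_from_orders_py := by
  intro orders _
  show payment_entitlements_from_orders_py orders = payment_entitlements_from_orders_py_alt orders
  unfold payment_entitlements_from_orders_py payment_entitlements_from_orders_py_alt
  have hApp : (fun item => pvLower (pvGet item "status") == "approved") = pvIsApp := rfl
  simp only [hApp, pvStep_foldl, Bool.false_or, pv_contains_filter_map, pv_isEmpty_filter,
    pv_any_filter]
  rw [show (fun x => pvIsApp x &&
      (pvTruthy (pvGet x "include_filing") || (pvLower (pvGet x "product_code") == "addon_filing_auto")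
        || orders.any (fun y => pvIsApp y && (pvLower (pvGet y "product_code") == "addon_filing_bundle"))))
    = (fun x => pvIsApp x &&
      (pvTruthy (pvGet x "include_filing") || pvCodeIs "addon_filing_auto" x
        || orders.any (fun y => pvIsApp y && pvCodeIs "addon_filing_bundle" y))) from rfl]
  rw [pv_filing_eq]
  rfl
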